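-- pv_equiv track=rewrite | github.com/PostHog/posthog | posthog/temporal/ducklake/ducklake_copy_data_modeling_workflow.py | _diff_schema
-- ===== SOURCE A (Python) =====
-- def _diff_schema(source_schema: list[tuple[str, str]], ducklake_schema: list[tuple[str, str]]) -> list[str]:
--     mismatches: list[str] = []
--     source_map = _schema_map(source_schema)
--     ducklake_map = _schema_map(ducklake_schema)
--
--     source_keys = set(source_map.keys())
--     ducklake_keys = set(ducklake_map.keys())
--
--     for key in sorted(source_keys - ducklake_keys):
--         column_name, _ = source_map[key]
--         mismatches.append(f"{column_name} missing from DuckLake")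
--
--     for key in sorted(ducklake_keys - source_keys):
--         column_name, _ = ducklake_map[key]
--         mismatches.append(f"{column_name} missing from Delta source")
--
--     for key in sorted(source_keys & ducklake_keys):
--         source_name, source_type = source_map[key]
--         _, ducklake_type = ducklake_map[key]
--         if source_type != ducklake_type:
--             mismatches.append(f"{source_name} type mismatch (delta={source_type}, ducklake={ducklake_type})")
--
--     return mismatches
--
-- def _schema_map(schema: list[tuple[str, str]]) -> dict[str, tuple[str, str]]:
--     mapping: dict[str, tuple[str, str]] = {}
--     for name, column_type in schema:
--         normalized_name = (name or "").strip().lower()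
--         mapping[normalized_name] = (name, (column_type or "").strip())
--     return mapping
-- ===== SOURCE B (Python) =====
-- def _schema_map(schema):
--     mapping = {}
--     for name, column_type in schema:
--         normalized_name = (name or "").strip().lower()
--         mapping[normalized_name] = (name, (column_type or "").strip())
--     return mapping
--
--
-- def _diff_schema(source_schema, ducklake_schema):
--     source_map = _schema_map(source_schema)
--     ducklake_map = _schema_map(ducklake_schema)
--     skeys = sorted(source_map)
--     dkeys = sorted(ducklake_map)
--     missing_ducklake = []
--     missing_source = []
--     mismatches = []
--     # two-pointer merge of the two sorted, duplicate-free key sequences: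
--     # never materializes set differences/intersections
--     i = j = 0
--     while i < len(skeys) and j < len(dkeys):
--         a, b = skeys[i], dkeys[j]
--         if a < b:
--             missing_ducklake.append(f"{source_map[a][0]} missing from DuckLake")
--             i += 1
--         elif b < a:
--             missing_source.append(f"{ducklake_map[b][0]} missing from Delta source")
--             j += 1
--         else:
--             name, stype = source_map[a]
--             dtype = ducklake_map[a][1]
--             if stype != dtype:
--                 mismatches.append(f"{name} type mismatch (delta={stype}, ducklake={dtype})")
--             i += 1
--             j += 1
--     for a in skeys[i:]:
--         missing_ducklake.append(f"{source_map[a][0]} missing from DuckLake")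
--     for b in dkeys[j:]:
--         missing_source.append(f"{ducklake_map[b][0]} missing from Delta source")
--     return missing_ducklake + missing_source + mismatches
-- ===== Notes on version B (the rewrite author's own statement) =====
-- stated objective: alternative
-- what changed: A builds two key sets and makes three separate sorted passes over the set difference, reverse difference and intersection; B never forms any set operations: it sorts each map's keys once and runs a single two-pointer merge over the two sorted key sequences, classifying keys by head comparison and draining the leftover tail afterwards.
import Mathlib
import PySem

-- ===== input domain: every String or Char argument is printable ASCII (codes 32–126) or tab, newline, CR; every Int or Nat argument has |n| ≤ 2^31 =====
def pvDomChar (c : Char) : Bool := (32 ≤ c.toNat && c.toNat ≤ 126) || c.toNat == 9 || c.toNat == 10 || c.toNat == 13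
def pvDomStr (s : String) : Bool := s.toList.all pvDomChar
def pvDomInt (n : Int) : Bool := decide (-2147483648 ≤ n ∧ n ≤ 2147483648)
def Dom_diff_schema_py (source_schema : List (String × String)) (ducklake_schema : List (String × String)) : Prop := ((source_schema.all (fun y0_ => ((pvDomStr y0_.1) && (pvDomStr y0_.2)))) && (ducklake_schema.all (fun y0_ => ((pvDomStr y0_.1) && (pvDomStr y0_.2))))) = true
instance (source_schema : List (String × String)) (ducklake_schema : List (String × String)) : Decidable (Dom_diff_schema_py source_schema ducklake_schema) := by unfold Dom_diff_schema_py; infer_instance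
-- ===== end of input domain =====

-- B replaces A's three sorted set-difference/intersection passes by a single two-pointer
-- merge of the two sorted key sequences (objective: alternative algorithm, same result).

-- ===== PORT A =====
-- shared module helper `_schema_map` (used verbatim by both Pythons):
-- last-write-wins dict of normalized name ↦ (original name, stripped type)
def pySchemaMap (schema : List (String × String)) : PySem.Dict String (String × String) :=
  schema.foldl
    (fun mapping p =>
      let name := p.1
      let column_type := p.2
      let normalized_name := PySem.Str.lower (PySem.Str.strip (if name == "" then "" else name))
      mapping.insert normalized_name (name, PySem.Str.strip (if column_type == "" then "" else column_type)))
    PySem.Dict.empty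

-- the three f-string messages and the type-inequality test (shared text of both Pythons)
def msgMissingDL (m : PySem.Dict String (String × String)) (key : String) : String :=
  (m.getD key ("", "")).1 ++ " missing from DuckLake"
def msgMissingSrc (m : PySem.Dict String (String × String)) (key : String) : String :=
  (m.getD key ("", "")).1 ++ " missing from Delta source"
def msgMismatch (sm dm : PySem.Dict String (String × String)) (key : String) : String :=
  (sm.getD key ("", "")).1 ++ " type mismatch (delta=" ++ (sm.getD key ("", "")).2 ++
    ", ducklake=" ++ (dm.getD key ("", "")).2 ++ ")"
def typeNe (sm dm : PySem.Dict String (String × String)) (key : String) : Bool :=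
  !((sm.getD key ("", "")).2 == (dm.getD key ("", "")).2)

def diff_schema_py (source_schema : List (String × String)) (ducklake_schema : List (String × String)) : List String :=
  let source_map := pySchemaMap source_schema
  let ducklake_map := pySchemaMap ducklake_schema
  let source_keys := PySem.Set.ofList source_map.keys
  let ducklake_keys := PySem.Set.ofList ducklake_map.keys
  let mismatches : List String := []
  let mismatches := (PySem.List.sorted (PySem.Set.diff source_keys ducklake_keys) (fun x => x)).foldl
    (fun acc key => acc ++ [msgMissingDL source_map key]) mismatches
  let mismatches := (PySem.List.sorted (PySem.Set.diff ducklake_keys source_keys) (fun x => x)).foldl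
    (fun acc key => acc ++ [msgMissingSrc ducklake_map key]) mismatches
  (PySem.List.sorted (PySem.Set.inter source_keys ducklake_keys) (fun x => x)).foldl
    (fun acc key => if typeNe source_map ducklake_map key then acc ++ [msgMismatch source_map ducklake_map key] else acc) mismatches

-- ===== PORT B =====
-- B's two-pointer while-loop: consume the heads of the two sorted key sequences,
-- appending each classified message to one of the three accumulated lists; when one
-- sequence is exhausted, drain the other (the two trailing for-loops of Source B).
def bMerge (sm dm : PySem.Dict String (String × String))
    (acc : List String × List String × List String) :
    List String → List String → List String × List String × List String
  | x :: xs, y :: ys =>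
    if x < y then
      bMerge sm dm (acc.1 ++ [msgMissingDL sm x], acc.2.1, acc.2.2) xs (y :: ys)
    else if y < x then
      bMerge sm dm (acc.1, acc.2.1 ++ [msgMissingSrc dm y], acc.2.2) (x :: xs) ys
    else
      bMerge sm dm
        (acc.1, acc.2.1,
          if typeNe sm dm x then acc.2.2 ++ [msgMismatch sm dm x] else acc.2.2) xs ys
  | xs, ys =>
    (acc.1 ++ xs.map (msgMissingDL sm), acc.2.1 ++ ys.map (msgMissingSrc dm), acc.2.2)
  termination_by xs ys => xs.length + ys.length

def diff_schema_py_alt (source_schema : List (String × String)) (ducklake_schema : List (String × String)) : List String :=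
  let source_map := pySchemaMap source_schema
  let ducklake_map := pySchemaMap ducklake_schema
  let skeys := PySem.List.sorted source_map.keys (fun x => x)
  let dkeys := PySem.List.sorted ducklake_map.keys (fun x => x)
  let r := bMerge source_map ducklake_map ([], [], []) skeys dkeys
  r.1 ++ r.2.1 ++ r.2.2

-- ===== PRECONDITION & SPEC =====
def Spec_diff_schema_py (source_schema : List (String × String)) (ducklake_schema : List (String × String)) (out : List String) : Prop := out = diff_schema_py_alt source_schema ducklake_schema
instance (source_schema : List (String × String)) (ducklake_schema : List (String × String)) (out : List String) : Decidable (Spec_diff_schema_py source_schema ducklake_schema out) := by unfold Spec_diff_schema_py; infer_instance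

-- ===== CLAIM (what is proved, stated in full; the proofs are below) =====
def Claim_equal_diff_schema_py : Prop := ∀ (source_schema : List (String × String)) (ducklake_schema : List (String × String)), Dom_diff_schema_py source_schema ducklake_schema → Spec_diff_schema_py source_schema ducklake_schema (diff_schema_py source_schema ducklake_schema)

-- ===== LEMMAS AND PROOFS =====

-- B's merge, characterised: on strictly increasing inputs it appends exactly the three
-- filtered/mapped pieces A computes (filter by membership in the other key sequence).
theorem bMerge_eq (sm dm : PySem.Dict String (String × String)) :
    ∀ (xs ys : List String) (acc : List String × List String × List String),
      xs.Pairwise (· < ·) → ys.Pairwise (· < ·) →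
      bMerge sm dm acc xs ys =
        (acc.1 ++ (xs.filter (fun k => !decide (k ∈ ys))).map (msgMissingDL sm),
         acc.2.1 ++ (ys.filter (fun k => !decide (k ∈ xs))).map (msgMissingSrc dm),
         acc.2.2 ++ ((xs.filter (fun k => decide (k ∈ ys))).filter (typeNe sm dm)).map (msgMismatch sm dm))
  | [], ys, acc, _, _ => by simp [bMerge]
  | x :: xs, [], acc, _, _ => by simp [bMerge]
  | x :: xs, y :: ys, acc, hx, hy => by
    have hxs := List.Pairwise.of_cons hx
    have hys := List.Pairwise.of_cons hy
    have hxlt : ∀ z ∈ xs, x < z := fun z hz => List.rel_of_pairwise_cons hx hz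
    have hylt : ∀ z ∈ ys, y < z := fun z hz => List.rel_of_pairwise_cons hy hz
    by_cases hlt : x < y
    · have hxny : x ∉ y :: ys := by
        simp only [List.mem_cons]
        rintro (rfl | hm)
        · exact lt_irrefl _ hlt
        · exact lt_irrefl _ (hlt.trans (hylt _ hm))
      have e1 : (x :: xs).filter (fun k => !decide (k ∈ y :: ys)) =
          x :: xs.filter (fun k => !decide (k ∈ y :: ys)) :=
        List.filter_cons_of_pos (by simpa using hxny)
      have e2 : (y :: ys).filter (fun k => !decide (k ∈ x :: xs)) =
          (y :: ys).filter (fun k => !decide (k ∈ xs)) := by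
        refine List.filter_congr (fun z hz => ?_)
        have hzx : z ≠ x := fun h => hxny (h ▸ hz)
        simp [List.mem_cons, hzx]
      have e3 : (x :: xs).filter (fun k => decide (k ∈ y :: ys)) =
          xs.filter (fun k => decide (k ∈ y :: ys)) :=
        List.filter_cons_of_neg (by simpa using hxny)
      rw [bMerge, if_pos hlt, bMerge_eq sm dm xs (y :: ys) _ hxs hy, e1, ← e2, ← e3]
      simp
    · by_cases hgt : y < x
      · have hynx : y ∉ x :: xs := by
          simp only [List.mem_cons]
          rintro (rfl | hm)
          · exact lt_irrefl _ hgt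
          · exact lt_irrefl _ (hgt.trans (hxlt _ hm))
        have e1 : (x :: xs).filter (fun k => !decide (k ∈ y :: ys)) =
            (x :: xs).filter (fun k => !decide (k ∈ ys)) := by
          refine List.filter_congr (fun z hz => ?_)
          have hzy : z ≠ y := fun h => hynx (h ▸ hz)
          simp [List.mem_cons, hzy]
        have e2 : (y :: ys).filter (fun k => !decide (k ∈ x :: xs)) =
            y :: ys.filter (fun k => !decide (k ∈ x :: xs)) :=
          List.filter_cons_of_pos (by simpa using hynx)
        have e3 : (x :: xs).filter (fun k => decide (k ∈ y :: ys)) =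
            (x :: xs).filter (fun k => decide (k ∈ ys)) := by
          refine List.filter_congr (fun z hz => ?_)
          have hzy : z ≠ y := fun h => hynx (h ▸ hz)
          simp [List.mem_cons, hzy]
        rw [bMerge, if_neg hlt, if_pos hgt, bMerge_eq sm dm (x :: xs) ys _ hx hys,
          ← e1, e2, ← e3]
        simp
      · have heq : x = y := le_antisymm (not_lt.mp hgt) (not_lt.mp hlt)
        subst heq
        have e1 : (x :: xs).filter (fun k => !decide (k ∈ x :: ys)) =
            xs.filter (fun k => !decide (k ∈ ys)) := by
          rw [List.filter_cons_of_neg (by simp)]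
          refine List.filter_congr (fun z hz => ?_)
          simp [List.mem_cons, ne_of_gt (hxlt z hz)]
        have e2 : (x :: ys).filter (fun k => !decide (k ∈ x :: xs)) =
            ys.filter (fun k => !decide (k ∈ xs)) := by
          rw [List.filter_cons_of_neg (by simp)]
          refine List.filter_congr (fun z hz => ?_)
          simp [List.mem_cons, ne_of_gt (hylt z hz)]
        have e3 : (x :: xs).filter (fun k => decide (k ∈ x :: ys)) =
            x :: xs.filter (fun k => decide (k ∈ ys)) := by
          rw [List.filter_cons_of_pos (by simp)]
          congr 1
          refine List.filter_congr (fun z hz => ?_)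
          simp [List.mem_cons, ne_of_gt (hxlt z hz)]
        rw [bMerge, if_neg hlt, if_neg hgt, bMerge_eq sm dm xs ys _ hxs hys, ← e1, ← e2, e3]
        cases ht : typeNe sm dm x <;> simp [ht]
  termination_by xs ys => xs.length + ys.length

theorem diff_schema_eq (source_schema ducklake_schema : List (String × String)) :
    diff_schema_py source_schema ducklake_schema = diff_schema_py_alt source_schema ducklake_schema := by
  simp only [diff_schema_py, diff_schema_py_alt]
  generalize hsm : pySchemaMap source_schema = sm
  generalize hdm : pySchemaMap ducklake_schema = dm
  have hsmnd : sm.keys.Nodup := by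
    rw [← hsm]
    exact PySem.Dict.nodup_keys_foldl_insert_key _ _ _ _ PySem.Dict.nodup_keys_empty
  have hdmnd : dm.keys.Nodup := by
    rw [← hdm]
    exact PySem.Dict.nodup_keys_foldl_insert_key _ _ _ _ PySem.Dict.nodup_keys_empty
  set S := PySem.Set.ofList sm.keys with hSdef
  set D := PySem.Set.ofList dm.keys with hDdef
  set skeys := PySem.List.sorted sm.keys (fun x => x) with hskdef
  set dkeys := PySem.List.sorted dm.keys (fun x => x) with hdkdef
  have hSnd : S.Nodup := PySem.Set.nodup_ofList sm.keys
  have hDnd : D.Nodup := PySem.Set.nodup_ofList dm.keys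
  have hsknd : skeys.Nodup := ((PySem.List.sorted_perm sm.keys (fun x => x) false).nodup_iff).mpr hsmnd
  have hdknd : dkeys.Nodup := ((PySem.List.sorted_perm dm.keys (fun x => x) false).nodup_iff).mpr hdmnd
  have hsklt : skeys.Pairwise (· < ·) :=
    ((PySem.List.sorted_pairwise sm.keys (fun x => x)).and hsknd).imp
      (fun h => lt_of_le_of_ne h.1 h.2)
  have hdklt : dkeys.Pairwise (· < ·) :=
    ((PySem.List.sorted_pairwise dm.keys (fun x => x)).and hdknd).imp
      (fun h => lt_of_le_of_ne h.1 h.2)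
  have hmemS : ∀ x, x ∈ skeys ↔ x ∈ S := fun x =>
    (PySem.List.mem_sorted sm.keys (fun x => x) false x).trans (PySem.Set.mem_ofList sm.keys x).symm
  have hmemD : ∀ x, x ∈ dkeys ↔ x ∈ D := fun x =>
    (PySem.List.mem_sorted dm.keys (fun x => x) false x).trans (PySem.Set.mem_ofList dm.keys x).symm
  -- A's three sorted set lists ARE the membership filters of B's sorted key sequences
  have h1 : PySem.List.sorted (PySem.Set.diff S D) (fun x => x) =
      skeys.filter (fun k => !decide (k ∈ dkeys)) := by
    refine PySem.List.sorted_eq_of_perm_of_pairwise_lt _ _ _ ?_ (hsklt.filter _)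
    refine (List.perm_ext_iff_of_nodup (hsknd.filter _) (PySem.Set.nodup_diff S D hSnd)).mpr
      (fun x => ?_)
    simp only [List.mem_filter, PySem.Set.mem_diff, ← hmemS, ← hmemD,
      Bool.not_eq_eq_eq_not, Bool.not_true, decide_eq_false_iff_not]
  have h2 : PySem.List.sorted (PySem.Set.diff D S) (fun x => x) =
      dkeys.filter (fun k => !decide (k ∈ skeys)) := by
    refine PySem.List.sorted_eq_of_perm_of_pairwise_lt _ _ _ ?_ (hdklt.filter _)
    refine (List.perm_ext_iff_of_nodup (hdknd.filter _) (PySem.Set.nodup_diff D S hDnd)).mpr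
      (fun x => ?_)
    simp only [List.mem_filter, PySem.Set.mem_diff, ← hmemS, ← hmemD,
      Bool.not_eq_eq_eq_not, Bool.not_true, decide_eq_false_iff_not]
  have h3 : PySem.List.sorted (PySem.Set.inter S D) (fun x => x) =
      skeys.filter (fun k => decide (k ∈ dkeys)) := by
    refine PySem.List.sorted_eq_of_perm_of_pairwise_lt _ _ _ ?_ (hsklt.filter _)
    refine (List.perm_ext_iff_of_nodup (hsknd.filter _) (PySem.Set.nodup_inter S D hSnd)).mpr
      (fun x => ?_)
    simp only [List.mem_filter, PySem.Set.mem_inter, ← hmemS, ← hmemD, decide_eq_true_eq]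
  rw [bMerge_eq sm dm skeys dkeys ([], [], []) hsklt hdklt]
  rw [PySem.List.foldl_append_singleton_eq_map, PySem.List.foldl_append_singleton_eq_map,
    PySem.List.foldl_append_if, h1, h2, h3]
  simp [List.append_assoc]

-- ===== VERDICT (by name: the statement is the Claim_ definition above) =====
theorem diff_schema_py_spec : Claim_equal_diff_schema_py := by
  intro ss ds _
  unfold Spec_diff_schema_py
  exact diff_schema_eq ss ds
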